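-- pv_equiv track=rewrite | github.com/anemele/py-pdf | src/py_pdf/_com/__init__.py | sort_from_booklet
-- ===== SOURCE A (Python) =====
-- from typing import Optional, Sequence, TypeVar
--
-- T = TypeVar("T")
--
-- def sort_from_booklet(pages: Sequence[T]) -> Sequence[T]:
--     """将PDF页面从小册子顺序转换为自然顺序。
--     页面数目必须是 4 的倍数。
--     8, 1, 2, 7, 6, 3, 4, 5
--     ->
--     1, 2, 3, 4, 5, 6, 7, 8
--     """
--     if len(pages) % 4 != 0:
--         raise ValueError("页面数目必须是 4 的倍数")
--
--     left = list[T]()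
--     right = list[T]()
--     for i in range(len(pages) // 2):
--         if i % 2 == 0:
--             left.append(pages[2 * i])
--             right.append(pages[2 * i + 1])
--         else:
--             left.append(pages[2 * i + 1])
--             right.append(pages[2 * i])
--
--     return right + left[::-1]
-- ===== SOURCE B (Python) =====
-- def sort_from_booklet(pages):
--     n = len(pages)
--     if n % 4 != 0:
--         raise ValueError("页面数目必须是 4 的倍数")
--     half = n // 2
--
--     def src(k):
--         if k < half:
--             return 2 * k + 1 if k % 2 == 0 else 2 * k
--         j = n - 1 - k
--         return 2 * j if j % 2 == 0 else 2 * j + 1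
--
--     return [pages[src(k)] for k in range(n)]
-- ===== Notes on version B (the rewrite author's own statement) =====
-- stated objective: alternative
-- what changed: B computes the source index for each output position directly in one pass over range(len(pages)), instead of building left/right lists and returning right + reversed(left).
import Mathlib
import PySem

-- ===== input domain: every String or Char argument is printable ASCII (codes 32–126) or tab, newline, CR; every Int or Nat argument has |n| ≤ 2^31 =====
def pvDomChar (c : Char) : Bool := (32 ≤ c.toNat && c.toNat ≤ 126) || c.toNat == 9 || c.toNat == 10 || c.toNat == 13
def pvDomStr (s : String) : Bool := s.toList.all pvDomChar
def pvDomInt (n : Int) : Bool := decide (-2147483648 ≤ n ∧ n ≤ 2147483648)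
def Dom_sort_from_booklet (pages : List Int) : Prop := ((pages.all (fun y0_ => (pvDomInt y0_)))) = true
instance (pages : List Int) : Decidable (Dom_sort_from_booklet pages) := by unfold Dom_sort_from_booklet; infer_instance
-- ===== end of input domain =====

-- B replaces A's left/right list build + reversal by a single pass that computes
-- the source index for each output position (same cost, different decomposition).


-- ===== PORT A =====
def sort_from_booklet (pages : List Int) : List Int :=
  if pages.length % 4 ≠ 0 then []   -- ValueError: excluded by Pre_
  else
    let st := (PySem.List.pyRange 0 (PySem.Int.floordiv (pages.length : Int) 2) 1).foldl
      (fun (st : List Int × List Int) i =>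
        if PySem.Int.mod i 2 = 0 then
          (st.1 ++ [PySem.List.pyGetD pages (2 * i) 0],
           st.2 ++ [PySem.List.pyGetD pages (2 * i + 1) 0])
        else
          (st.1 ++ [PySem.List.pyGetD pages (2 * i + 1) 0],
           st.2 ++ [PySem.List.pyGetD pages (2 * i) 0]))
      ([], [])
    st.2 ++ st.1.reverse

-- ===== PORT B =====
def sort_from_booklet_alt (pages : List Int) : List Int :=
  if pages.length % 4 ≠ 0 then []   -- ValueError: excluded by Pre_
  else
    let n : Int := pages.length
    let half : Int := PySem.Int.floordiv n 2
    (PySem.List.pyRange 0 n 1).map (fun k =>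
      PySem.List.pyGetD pages
        (if k < half then (if PySem.Int.mod k 2 = 0 then 2 * k + 1 else 2 * k)
         else
           let j := n - 1 - k
           if PySem.Int.mod j 2 = 0 then 2 * j else 2 * j + 1) 0)

-- ===== PRECONDITION & SPEC =====
-- A raises ValueError when the page count is not a multiple of 4; Pre_ excludes exactly those inputs.
def Pre_sort_from_booklet (pages : List Int) : Prop := pages.length % 4 = 0
instance (pages : List Int) : Decidable (Pre_sort_from_booklet pages) := by unfold Pre_sort_from_booklet; infer_instance
def pvWitness_sort_from_booklet : List Int := [8, 1, 2, 7, 6, 3, 4, 5]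
def Spec_sort_from_booklet (pages : List Int) (out : List Int) : Prop := out = sort_from_booklet_alt pages
instance (pages : List Int) (out : List Int) : Decidable (Spec_sort_from_booklet pages out) := by unfold Spec_sort_from_booklet; infer_instance

-- ===== CLAIM (what is proved, stated in full; the proofs are below) =====
def Claim_equal_sort_from_booklet : Prop := ∀ (pages : List Int), Dom_sort_from_booklet pages → Pre_sort_from_booklet pages → Spec_sort_from_booklet pages (sort_from_booklet pages)

-- ===== LEMMAS AND PROOFS =====

-- A's loop builds (left, right) = (map f (range h), map g (range h))
def pvF (pages : List Int) (i : Nat) : Int :=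
  if i % 2 = 0 then PySem.List.pyGetD pages (2 * (i : Int)) 0
  else PySem.List.pyGetD pages (2 * (i : Int) + 1) 0

def pvG (pages : List Int) (i : Nat) : Int :=
  if i % 2 = 0 then PySem.List.pyGetD pages (2 * (i : Int) + 1) 0
  else PySem.List.pyGetD pages (2 * (i : Int)) 0

theorem pv_mod_two (m : Nat) : PySem.Int.mod (m : Int) 2 = 0 ↔ m % 2 = 0 := by
  rw [PySem.Int.mod_eq_emod_of_pos (by omega)]
  omega

theorem pv_fold (pages : List Int) (h : Nat) :
    (PySem.List.pyRange 0 (h : Int) 1).foldl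
      (fun (st : List Int × List Int) i =>
        if PySem.Int.mod i 2 = 0 then
          (st.1 ++ [PySem.List.pyGetD pages (2 * i) 0],
           st.2 ++ [PySem.List.pyGetD pages (2 * i + 1) 0])
        else
          (st.1 ++ [PySem.List.pyGetD pages (2 * i + 1) 0],
           st.2 ++ [PySem.List.pyGetD pages (2 * i) 0]))
      ([], [])
    = ((List.range h).map (pvF pages), (List.range h).map (pvG pages)) := by
  induction h with
  | zero => simp
  | succ m ih =>
      rw [show ((m + 1 : Nat) : Int) = (m : Int) + 1 by push_cast; ring,
        @PySem.List.pyRange_one_succ_right 0 (m : Int) (by omega),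
        List.foldl_append, ih, List.range_succ]
      by_cases hp : m % 2 = 0
      · simp [List.foldl, pvF, pvG, hp]
        intro hc; exact absurd hc (by omega)
      · simp [List.foldl, hp, pvF, pvG]
        intro hc; exact absurd hc (by omega)

theorem sort_from_booklet_eq (pages : List Int) (hp : pages.length % 4 = 0) :
    sort_from_booklet pages = sort_from_booklet_alt pages := by
  unfold sort_from_booklet sort_from_booklet_alt
  simp only [hp, ne_eq, not_true_eq_false, if_false]
  set n := pages.length with hn
  have hfd : PySem.Int.floordiv (n : Int) 2 = ((n / 2 : Nat) : Int) := by
    exact_mod_cast PySem.Int.floordiv_natCast n 2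
  set h := n / 2 with hh
  have h2 : n = 2 * h := by omega
  rw [hfd, pv_fold pages h, PySem.List.pyRange_zero_nat]
  apply List.ext_getElem
  · simp; omega
  · intro k hk1 hk2
    simp only [List.length_append, List.length_map, List.length_reverse,
      List.length_range] at hk1
    have hkn : k < n := by omega
    simp only [List.getElem_map, List.getElem_range]
    by_cases hkh : k < h
    · rw [List.getElem_append_left (by simp [hkh])]
      have hlt : (k : Int) < ((h : Nat) : Int) := by exact_mod_cast hkh
      rw [if_pos hlt, List.getElem_map, List.getElem_range]
      unfold pvG
      by_cases hp2 : k % 2 = 0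
      · rw [if_pos hp2, if_pos ((pv_mod_two k).2 hp2)]
      · rw [if_neg hp2, if_neg ((pv_mod_two k).not.2 hp2)]
    · rw [List.getElem_append_right (by simp; omega)]
      have hge : ¬ ((k : Int) < ((h : Nat) : Int)) := by
        simp only [not_lt] at hkh ⊢; exact_mod_cast hkh
      rw [if_neg hge]
      simp only [List.getElem_reverse, List.getElem_map, List.getElem_range,
        List.length_map, List.length_range]
      unfold pvF
      have hj : ((n : Int) - 1 - (k : Int)) = ((n - 1 - k : Nat) : Int) := by
        omega
      have hidx : h - 1 - (k - h) = n - 1 - k := by omega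
      rw [hidx, hj]
      by_cases hp2 : (n - 1 - k) % 2 = 0
      · rw [if_pos hp2, if_pos ((pv_mod_two _).2 hp2)]
      · rw [if_neg hp2, if_neg ((pv_mod_two _).not.2 hp2)]

-- ===== VERDICT (by name: the statement is the Claim_ definition above) =====
theorem sort_from_booklet_spec : Claim_equal_sort_from_booklet := by
  intro pages _ hpre
  unfold Spec_sort_from_booklet
  exact sort_from_booklet_eq pages hpre
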